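-- pv_equiv track=rewrite | github.com/suryadizhang/mh-project- | apps/backend/src/services/knowledge_sync_service.py | _categorize_protein
-- ===== SOURCE A (Python) =====
-- def _categorize_protein(name: str) -> str:
--     """Determine category based on protein name"""
--     name_lower = name.lower()
--     if "chicken" in name_lower:
--         return "poultry"
--     elif any(x in name_lower for x in ["steak", "filet", "beef", "sirloin"]):
--         return "beef"
--     elif any(
--         x in name_lower for x in ["shrimp", "lobster", "scallop", "salmon", "calamari", "fish"]
--     ):
--         return "seafood"
--     elif any(x in name_lower for x in ["tofu", "vegetable"]):
--         return "specialty"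
--     return "other"
-- ===== SOURCE B (Python) =====
-- _KW2CAT = {
--     "chicken": "poultry",
--     "steak": "beef", "filet": "beef", "beef": "beef", "sirloin": "beef",
--     "shrimp": "seafood", "lobster": "seafood", "scallop": "seafood",
--     "salmon": "seafood", "calamari": "seafood", "fish": "seafood",
--     "tofu": "specialty", "vegetable": "specialty",
-- }
--
-- _PRIORITY = ["poultry", "beef", "seafood", "specialty"]
--
--
-- def _categorize_protein(name: str) -> str:
--     # Single left-to-right sweep: at every position of the lowercased name,
--     # record the category of every keyword that starts there, then resolve
--     # the collected categories by priority.
--     s = name.lower()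
--     matched = set()
--     for i in range(len(s) + 1):
--         for kw, cat in _KW2CAT.items():
--             if s.startswith(kw, i):
--                 matched.add(cat)
--     for cat in _PRIORITY:
--         if cat in matched:
--             return cat
--     return "other"
-- ===== Notes on version B (the rewrite author's own statement) =====
-- stated objective: alternative
-- what changed: Instead of per-keyword substring membership tests in a fixed if/elif chain, B does a single left-to-right sweep over the lowercased name, at each position recording the category of every keyword that starts there (a naive multi-pattern matcher with a keyword-to-category map), and finally resolves the accumulated category set by a priority list.
import Mathlib
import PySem

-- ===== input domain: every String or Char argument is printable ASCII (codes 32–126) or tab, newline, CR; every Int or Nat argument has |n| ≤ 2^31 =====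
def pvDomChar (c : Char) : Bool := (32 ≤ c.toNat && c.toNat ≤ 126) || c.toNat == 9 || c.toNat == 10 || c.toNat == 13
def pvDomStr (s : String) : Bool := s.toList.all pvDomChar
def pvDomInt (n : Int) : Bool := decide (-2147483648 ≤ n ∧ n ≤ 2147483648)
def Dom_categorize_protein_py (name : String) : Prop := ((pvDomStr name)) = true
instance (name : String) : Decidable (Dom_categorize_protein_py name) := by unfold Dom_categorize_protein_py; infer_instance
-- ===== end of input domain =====

-- B replaces A's per-keyword substring tests in an if/elif chain by a single sweep over the lowercased name that records at each position the category of every keyword starting there, then resolves by a priority list; same results (objective: alternative).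


-- ===== PORT A =====
def categorize_protein_py (name : String) : String :=
  let name_lower := PySem.Str.lower name
  if PySem.Str.isIn "chicken" name_lower then "poultry"
  else if (["steak", "filet", "beef", "sirloin"].any fun x => PySem.Str.isIn x name_lower) then "beef"
  else if (["shrimp", "lobster", "scallop", "salmon", "calamari", "fish"].any fun x => PySem.Str.isIn x name_lower) then "seafood"
  else if (["tofu", "vegetable"].any fun x => PySem.Str.isIn x name_lower) then "specialty"
  else "other"

-- ===== PORT B =====
-- the keyword → category map (Python _KW2CAT, items in insertion order), keys as char lists
def pvKw2Cat : List (List Char × String) :=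
  [("chicken".toList, "poultry"),
   ("steak".toList, "beef"), ("filet".toList, "beef"), ("beef".toList, "beef"), ("sirloin".toList, "beef"),
   ("shrimp".toList, "seafood"), ("lobster".toList, "seafood"), ("scallop".toList, "seafood"),
   ("salmon".toList, "seafood"), ("calamari".toList, "seafood"), ("fish".toList, "seafood"),
   ("tofu".toList, "specialty"), ("vegetable".toList, "specialty")]

def pvPriority : List String := ["poultry", "beef", "seafood", "specialty"]

-- inner loop: at the current position (suffix s), add the category of every keyword starting here
def pvStep (s : List Char) (a : PySem.Set String) (p : List Char × String) : PySem.Set String :=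
  if p.1.isPrefixOf s then PySem.Set.add a p.2 else a

-- outer sweep over all positions i = 0 … len(s) (suffixes of s, including the empty one)
def pvScan (kws : List (List Char × String)) : List Char → PySem.Set String → PySem.Set String
  | [], acc => kws.foldl (pvStep []) acc
  | c :: t, acc => pvScan kws t (kws.foldl (pvStep (c :: t)) acc)

def categorize_protein_py_alt (name : String) : String :=
  let s := (PySem.Str.lower name).toList
  let matched := pvScan pvKw2Cat s PySem.Set.empty
  match pvPriority.find? (fun c => PySem.Set.contains matched c) with
  | some c => c
  | none => "other"

-- ===== PRECONDITION & SPEC =====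
def Spec_categorize_protein_py (name : String) (out : String) : Prop := out = categorize_protein_py_alt name
instance (name : String) (out : String) : Decidable (Spec_categorize_protein_py name out) := by unfold Spec_categorize_protein_py; infer_instance

-- ===== CLAIM (what is proved, stated in full; the proofs are below) =====
def Claim_equal_categorize_protein_py : Prop := ∀ (name : String), Dom_categorize_protein_py name → Spec_categorize_protein_py name (categorize_protein_py name)

-- ===== LEMMAS AND PROOFS =====

theorem mem_foldl_pvStep (kws : List (List Char × String)) (s : List Char)
    (acc : PySem.Set String) (x : String) :
    x ∈ kws.foldl (pvStep s) acc ↔ x ∈ acc ∨ ∃ p ∈ kws, p.1.isPrefixOf s ∧ p.2 = x := by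
  induction kws generalizing acc with
  | nil => simp
  | cons q qs ih =>
    simp only [List.foldl_cons, pvStep]
    split_ifs with h
    · rw [ih]
      constructor
      · rintro (hx | ⟨p, hp, hpre, hpx⟩)
        · rcases (PySem.Set.mem_add _ _ _).mp hx with hx | rfl
          · exact Or.inl hx
          · exact Or.inr ⟨q, List.mem_cons_self, h, rfl⟩
        · exact Or.inr ⟨p, List.mem_cons_of_mem _ hp, hpre, hpx⟩
      · rintro (hx | ⟨p, hp, hpre, hpx⟩)
        · exact Or.inl ((PySem.Set.mem_add _ _ _).mpr (Or.inl hx))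
        · rcases List.mem_cons.mp hp with rfl | hp
          · exact Or.inl ((PySem.Set.mem_add _ _ _).mpr (Or.inr hpx.symm))
          · exact Or.inr ⟨p, hp, hpre, hpx⟩
    · rw [ih]
      constructor
      · rintro (hx | ⟨p, hp, hpre, hpx⟩)
        · exact Or.inl hx
        · exact Or.inr ⟨p, List.mem_cons_of_mem _ hp, hpre, hpx⟩
      · rintro (hx | ⟨p, hp, hpre, hpx⟩)
        · exact Or.inl hx
        · rcases List.mem_cons.mp hp with rfl | hp
          · exact absurd hpre h
          · exact Or.inr ⟨p, hp, hpre, hpx⟩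

theorem mem_pvScan (kws : List (List Char × String)) (s : List Char)
    (acc : PySem.Set String) (x : String) :
    x ∈ pvScan kws s acc ↔ x ∈ acc ∨ ∃ p ∈ kws, (∃ j, p.1 <+: s.drop j) ∧ p.2 = x := by
  induction s generalizing acc with
  | nil =>
    simp only [pvScan, mem_foldl_pvStep]
    constructor
    · rintro (h | ⟨p, hp, hpre, hx⟩)
      · exact Or.inl h
      · exact Or.inr ⟨p, hp, ⟨0, by simpa using List.isPrefixOf_iff_prefix.mp hpre⟩, hx⟩
    · rintro (h | ⟨p, hp, ⟨j, hpre⟩, hx⟩)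
      · exact Or.inl h
      · exact Or.inr ⟨p, hp, List.isPrefixOf_iff_prefix.mpr (by simpa using hpre), hx⟩
  | cons c t ih =>
    simp only [pvScan, ih, mem_foldl_pvStep]
    constructor
    · rintro ((h | ⟨p, hp, hpre, hx⟩) | ⟨p, hp, ⟨j, hpre⟩, hx⟩)
      · exact Or.inl h
      · exact Or.inr ⟨p, hp, ⟨0, by simpa using List.isPrefixOf_iff_prefix.mp hpre⟩, hx⟩
      · exact Or.inr ⟨p, hp, ⟨j + 1, by simpa using hpre⟩, hx⟩
    · rintro (h | ⟨p, hp, ⟨j, hpre⟩, hx⟩)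
      · exact Or.inl (Or.inl h)
      · cases j with
        | zero => exact Or.inl (Or.inr ⟨p, hp, List.isPrefixOf_iff_prefix.mpr (by simpa using hpre), hx⟩)
        | succ j => exact Or.inr ⟨p, hp, ⟨j, by simpa using hpre⟩, hx⟩

-- membership of a category in the swept set = some of its keywords occurs as a substring
theorem mem_pvScan_iff (s : List Char) (x : String) :
    x ∈ pvScan pvKw2Cat s PySem.Set.empty ↔
      ∃ p ∈ pvKw2Cat, PySem.Chars.isIn p.1 s = true ∧ p.2 = x := by
  simp only [mem_pvScan, PySem.Set.empty]
  constructor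
  · rintro (h | ⟨p, hp, hj, hx⟩)
    · simp at h
    · exact ⟨p, hp, (PySem.Chars.exists_prefix_drop_iff_isIn _ _).mp hj, hx⟩
  · rintro ⟨p, hp, hin, hx⟩
    exact Or.inr ⟨p, hp, (PySem.Chars.exists_prefix_drop_iff_isIn _ _).mpr hin, hx⟩

-- ===== VERDICT (by name: the statement is the Claim_ definition above) =====
theorem categorize_protein_py_spec : Claim_equal_categorize_protein_py := by
  intro name _
  unfold Spec_categorize_protein_py categorize_protein_py categorize_protein_py_alt
  set s := (PySem.Str.lower name).toList with hs
  have hmem : ∀ x, PySem.Set.contains (pvScan pvKw2Cat s PySem.Set.empty) x =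
      decide (∃ p ∈ pvKw2Cat, PySem.Chars.isIn p.1 s = true ∧ p.2 = x) := by
    intro x
    rw [Bool.eq_iff_iff, decide_eq_true_iff, ← mem_pvScan_iff]
    simp [PySem.Set.contains]
  simp only [pvPriority, List.find?, hmem]
  have hisIn : ∀ sub : String, PySem.Str.isIn sub (PySem.Str.lower name) =
      PySem.Chars.isIn sub.toList s := by
    intro sub; simp [hs]
  simp only [hisIn]
  by_cases h1 : PySem.Chars.isIn "chicken".toList s = true <;>
  by_cases h2 : (["steak", "filet", "beef", "sirloin"].any fun x => PySem.Chars.isIn x.toList s) = true <;>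
  by_cases h3 : (["shrimp", "lobster", "scallop", "salmon", "calamari", "fish"].any fun x => PySem.Chars.isIn x.toList s) = true <;>
  by_cases h4 : (["tofu", "vegetable"].any fun x => PySem.Chars.isIn x.toList s) = true <;>
  simp_all [pvKw2Cat, List.any, Bool.or_eq_true]
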